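-- pv_equiv track=rewrite | github.com/SnowStain/Artinx_Simulator_for_RM26UC | entities/entity_manager.py | _level_rule
-- ===== SOURCE A (Python) =====
-- def _level_rule(table, level):
--     if not isinstance(table, dict):
--         return {}
--     level_key = str(int(max(1, level)))
--     if level_key in table:
--         return table[level_key]
--     numeric_keys = sorted(int(key) for key in table.keys() if str(key).isdigit())
--     if not numeric_keys:
--         return {}
--     fallback_key = max([key for key in numeric_keys if key <= int(level)] or [numeric_keys[0]])
--     return table.get(str(fallback_key), {})
-- ===== SOURCE B (Python) =====
-- def _level_rule(table, level):
--     if not isinstance(table, dict):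
--         return {}
--     level_key = str(int(max(1, level)))
--     if level_key in table:
--         return table[level_key]
--     lvl = int(level)
--     smallest = None
--     best = None
--     for key in table.keys():
--         if not str(key).isdigit():
--             continue
--         n = int(key)
--         smallest = n if smallest is None else min(smallest, n)
--         if n <= lvl:
--             best = n if best is None else max(best, n)
--     if smallest is None:
--         return {}
--     fallback_key = smallest if best is None else best
--     return table.get(str(fallback_key), {})
-- ===== Notes on version B (the rewrite author's own statement) =====
-- stated objective: simpler
-- what changed: Replaces the sort of all numeric keys plus two intermediate filtered lists with a single linear pass over the keys that tracks the running minimum and the largest numeric key <= level.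
import Mathlib
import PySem

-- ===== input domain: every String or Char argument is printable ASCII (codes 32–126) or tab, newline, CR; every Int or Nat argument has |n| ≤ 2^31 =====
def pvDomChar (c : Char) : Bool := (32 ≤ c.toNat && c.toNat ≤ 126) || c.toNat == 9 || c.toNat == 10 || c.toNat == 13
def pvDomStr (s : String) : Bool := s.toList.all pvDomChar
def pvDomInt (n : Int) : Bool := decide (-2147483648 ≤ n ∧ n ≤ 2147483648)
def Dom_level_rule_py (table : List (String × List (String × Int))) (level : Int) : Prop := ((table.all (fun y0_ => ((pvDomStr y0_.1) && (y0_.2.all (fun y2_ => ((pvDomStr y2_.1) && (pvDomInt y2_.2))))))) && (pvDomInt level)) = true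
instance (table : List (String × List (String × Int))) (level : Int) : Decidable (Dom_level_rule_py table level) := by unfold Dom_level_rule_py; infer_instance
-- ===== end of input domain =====

-- B replaces A's sort of the numeric keys + two intermediate filtered lists with one
-- linear pass over the keys tracking the running minimum and the largest numeric key ≤ level (objective: simpler).
-- ===== PORT A =====
def level_rule_py (table : List (String × List (String × Int))) (level : Int) : List (String × Int) :=
  -- the isinstance(table, dict) guard always passes under the type convention
  let d := PySem.Dict.ofList table
  let level_key := PySem.Int.toStr (max 1 level)
  match d.get? level_key with
  | some v => v
  | none =>
    -- int(key) never fails on a key with strIsdigit, so getD 0 is exact here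
    let numeric_keys := PySem.List.sorted
      ((d.keys.filter (fun k => PySem.Str.strIsdigit k)).map (fun k => (PySem.Int.ofStr? k).getD 0))
      (fun x => x) false
    match numeric_keys with
    | [] => []
    | n0 :: _ =>
      let cand := numeric_keys.filter (fun k => decide (k ≤ level))
      let fallback := (PySem.List.max? (if cand.isEmpty then [n0] else cand) (fun x => x)).getD 0
      d.getD (PySem.Int.toStr fallback) []

-- ===== PORT B =====
def level_rule_py_alt (table : List (String × List (String × Int))) (level : Int) : List (String × Int) :=
  let d := PySem.Dict.ofList table
  let level_key := PySem.Int.toStr (max 1 level)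
  match d.get? level_key with
  | some v => v
  | none =>
    let st := d.keys.foldl
      (fun (acc : Option Int × Option Int) key =>
        if PySem.Str.strIsdigit key then
          let n := (PySem.Int.ofStr? key).getD 0
          (some (match acc.1 with | none => n | some s => min s n),
           if n ≤ level then some (match acc.2 with | none => n | some b => max b n) else acc.2)
        else acc)
      (none, none)
    match st.1 with
    | none => []
    | some smallest => d.getD (PySem.Int.toStr (st.2.getD smallest)) []

-- ===== PRECONDITION & SPEC =====
def Spec_level_rule_py (table : List (String × List (String × Int))) (level : Int) (out : List (String × Int)) : Prop := out = level_rule_py_alt table level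
instance (table : List (String × List (String × Int))) (level : Int) (out : List (String × Int)) : Decidable (Spec_level_rule_py table level out) := by unfold Spec_level_rule_py; infer_instance

-- ===== CLAIM (what is proved, stated in full; the proofs are below) =====
def Claim_equal_level_rule_py : Prop := ∀ (table : List (String × List (String × Int))) (level : Int), Dom_level_rule_py table level → Spec_level_rule_py table level (level_rule_py table level)

-- ===== LEMMAS AND PROOFS =====

-- the Option-valued accumulator steps of B's single pass
def pvMinStep (a : Option Int) (n : Int) : Option Int :=
  some (match a with | none => n | some s => min s n)

def pvMaxStep (a : Option Int) (n : Int) : Option Int :=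
  some (match a with | none => n | some b => max b n)

-- B's fold over the keys splits into a min-fold over the numeric values and a
-- max-fold over the numeric values that are ≤ level
theorem pv_fold_split (level : Int) (ks : List String) (acc : Option Int × Option Int) :
    ks.foldl
      (fun (acc : Option Int × Option Int) key =>
        if PySem.Str.strIsdigit key then
          let n := (PySem.Int.ofStr? key).getD 0
          (some (match acc.1 with | none => n | some s => min s n),
           if n ≤ level then some (match acc.2 with | none => n | some b => max b n) else acc.2)
        else acc) acc
    = (((ks.filter (fun k => PySem.Str.strIsdigit k)).map (fun k => (PySem.Int.ofStr? k).getD 0)).foldl pvMinStep acc.1,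
       ((((ks.filter (fun k => PySem.Str.strIsdigit k)).map (fun k => (PySem.Int.ofStr? k).getD 0)).filter (fun n => decide (n ≤ level))).foldl pvMaxStep acc.2)) := by
  induction ks generalizing acc with
  | nil => rfl
  | cons k t ih =>
    by_cases h : PySem.Str.strIsdigit k
    · simp only [List.foldl_cons, List.filter_cons, h, if_pos, List.map_cons]
      rw [ih]
      by_cases h2 : ((PySem.Int.ofStr? k).getD 0) ≤ level
      · simp [h2, pvMinStep, pvMaxStep]
      · simp [h2, pvMinStep]
    · simp only [List.foldl_cons, List.filter_cons, h]
      simpa using ih _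

theorem pv_foldl_minStep (t : List Int) (a : Int) :
    t.foldl pvMinStep (some a) = some (t.foldl min a) := by
  induction t generalizing a with
  | nil => rfl
  | cons x t ih => simpa [pvMinStep] using ih (min a x)

theorem pv_foldl_maxStep (t : List Int) (a : Int) :
    t.foldl pvMaxStep (some a) = some (t.foldl max a) := by
  induction t generalizing a with
  | nil => rfl
  | cons x t ih => simpa [pvMaxStep] using ih (max a x)

theorem pv_min_fold (ns : List Int) :
    ns.foldl pvMinStep none = PySem.List.min? ns (fun x => x) := by
  cases ns with
  | nil => rfl
  | cons x t =>
    rw [List.foldl_cons, PySem.List.min?_id_cons]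
    simpa [pvMinStep] using pv_foldl_minStep t x

theorem pv_max_fold (ns : List Int) :
    ns.foldl pvMaxStep none = PySem.List.max? ns (fun x => x) := by
  cases ns with
  | nil => rfl
  | cons x t =>
    rw [List.foldl_cons, PySem.List.max?_id_cons]
    simpa [pvMaxStep] using pv_foldl_maxStep t x

theorem pv_max_unique {xs ys : List Int} {m m' : Int}
    (hmem : ∀ y : Int, y ∈ xs ↔ y ∈ ys)
    (hx : PySem.List.max? xs (fun x => x) = some m)
    (hy : PySem.List.max? ys (fun x => x) = some m') : m = m' := by
  have b1 := PySem.List.max?_isMax hx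
  have b2 := PySem.List.max?_isMax hy
  exact le_antisymm (b2 m ((hmem m).1 (PySem.List.max?_mem hx)))
    (b1 m' ((hmem m').2 (PySem.List.max?_mem hy)))

-- ===== VERDICT (by name: the statement is the Claim_ definition above) =====
theorem level_rule_py_spec : Claim_equal_level_rule_py := by
  intro table level _
  unfold Spec_level_rule_py level_rule_py level_rule_py_alt
  set d := PySem.Dict.ofList table with hd
  cases hget : d.get? (PySem.Int.toStr (max 1 level)) with
  | some v => simp [hget]
  | none =>
    simp only [hget]
    rw [pv_fold_split]
    set ns := ((d.keys.filter (fun k => PySem.Str.strIsdigit k)).map (fun k => (PySem.Int.ofStr? k).getD 0)) with hns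
    rw [pv_min_fold, pv_max_fold]
    cases hs : PySem.List.sorted ns (fun x => x) false with
    | nil =>
      have hnil : ns = [] := (PySem.List.sorted_eq_nil_iff ns (fun x => x) false).1 hs
      simp [hnil, PySem.List.min?]
    | cons n0 t =>
      have hn0mem : n0 ∈ ns := (PySem.List.mem_sorted ns (fun x => x) false n0).1 (by rw [hs]; exact List.mem_cons_self)
      have hn0min : ∀ y ∈ ns, n0 ≤ y := PySem.List.key_head_sorted_le ns (fun x => x) hs
      have hne : ns ≠ [] := fun h => by simp [h] at hn0mem
      obtain ⟨m, hm⟩ : ∃ m, PySem.List.min? ns (fun x => x) = some m := by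
        cases h : PySem.List.min? ns (fun x => x) with
        | none => exact absurd ((PySem.List.min?_eq_none_iff ns (fun x => x)).1 h) hne
        | some m => exact ⟨m, rfl⟩
      have hmval : m = n0 :=
        le_antisymm (PySem.List.min?_isMin hm n0 hn0mem) (hn0min m (PySem.List.min?_mem hm))
      have hmemf : ∀ y : Int,
          y ∈ (PySem.List.sorted ns (fun x => x) false).filter (fun k => decide (k ≤ level))
          ↔ y ∈ ns.filter (fun n => decide (n ≤ level)) := by
        intro y
        simp [List.mem_filter, PySem.List.mem_sorted]
      have hiff : ((PySem.List.sorted ns (fun x => x) false).filter (fun k => decide (k ≤ level)) = [])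
          ↔ (ns.filter (fun n => decide (n ≤ level)) = []) := by
        constructor
        · intro h
          rw [List.eq_nil_iff_forall_not_mem]
          intro y hy
          exact absurd ((hmemf y).2 hy) (by simp [h])
        · intro h
          rw [List.eq_nil_iff_forall_not_mem]
          intro y hy
          exact absurd ((hmemf y).1 hy) (by simp [h])
      by_cases hcand : (PySem.List.sorted ns (fun x => x) false).filter (fun k => decide (k ≤ level)) = []
      · -- no numeric key ≤ level: A takes max([numeric_keys[0]]), B falls back to smallest
        have hfn : ns.filter (fun n => decide (n ≤ level)) = [] := hiff.1 hcand
        simp only [hs] at hcand ⊢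
        simp [hcand, hfn, hm, hmval, PySem.List.max?]
      · -- some numeric key ≤ level: both take its maximum
        have hfn : ns.filter (fun n => decide (n ≤ level)) ≠ [] := fun h => hcand (hiff.2 h)
        obtain ⟨ma, hma⟩ : ∃ ma, PySem.List.max? ((PySem.List.sorted ns (fun x => x) false).filter (fun k => decide (k ≤ level))) (fun x => x) = some ma := by
          cases h : PySem.List.max? ((PySem.List.sorted ns (fun x => x) false).filter (fun k => decide (k ≤ level))) (fun x => x) with
          | none => exact absurd ((PySem.List.max?_eq_none_iff _ (fun x => x)).1 h) hcand
          | some ma => exact ⟨ma, rfl⟩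
        obtain ⟨mb, hmb⟩ : ∃ mb, PySem.List.max? (ns.filter (fun n => decide (n ≤ level))) (fun x => x) = some mb := by
          cases h : PySem.List.max? (ns.filter (fun n => decide (n ≤ level))) (fun x => x) with
          | none => exact absurd ((PySem.List.max?_eq_none_iff _ (fun x => x)).1 h) hfn
          | some mb => exact ⟨mb, rfl⟩
        have hab : ma = mb := pv_max_unique hmemf hma hmb
        simp only [hs] at hcand hma ⊢
        simp [List.isEmpty_iff, hcand, hma, hmb, hm, hab]
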